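-- pv_equiv track=rewrite | github.com/CodingThrust/problem-reductions | docs/paper/verify-reductions/verify_exact_cover_by_3_sets_minimum_weight_solution_to_linear_equations.py | is_exact_cover
-- ===== SOURCE A (Python) =====
-- def is_exact_cover(universe_size, subsets, config):
--     """Check if config selects an exact cover."""
--     if len(config) != len(subsets):
--         return False
--     q = universe_size // 3
--     selected = [i for i, v in enumerate(config) if v == 1]
--     if len(selected) != q:
--         return False
--     covered = set()
--     for idx in selected:
--         for elem in subsets[idx]:
--             if elem in covered:
--                 return False
--             covered.add(elem)
--     return len(covered) == universe_size
-- ===== SOURCE B (Python) =====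
-- def is_exact_cover(universe_size, subsets, config):
--     """Check if config selects an exact cover."""
--     if len(config) != len(subsets):
--         return False
--     picked = [s for s, v in zip(subsets, config) if v == 1]
--     if len(picked) != universe_size // 3:
--         return False
--     elems = sorted(e for s in picked for e in s)
--     if len(elems) != universe_size:
--         return False
--     return all(a < b for a, b in zip(elems, elems[1:]))
-- ===== Notes on version B (the rewrite author's own statement) =====
-- stated objective: alternative
-- what changed: Replaces A's incremental hash-set membership scan with early return by a sort-based check: concatenate the selected subsets, sort, and verify length == universe_size with all adjacent pairs strictly increasing (no set is built).
import Mathlib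
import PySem

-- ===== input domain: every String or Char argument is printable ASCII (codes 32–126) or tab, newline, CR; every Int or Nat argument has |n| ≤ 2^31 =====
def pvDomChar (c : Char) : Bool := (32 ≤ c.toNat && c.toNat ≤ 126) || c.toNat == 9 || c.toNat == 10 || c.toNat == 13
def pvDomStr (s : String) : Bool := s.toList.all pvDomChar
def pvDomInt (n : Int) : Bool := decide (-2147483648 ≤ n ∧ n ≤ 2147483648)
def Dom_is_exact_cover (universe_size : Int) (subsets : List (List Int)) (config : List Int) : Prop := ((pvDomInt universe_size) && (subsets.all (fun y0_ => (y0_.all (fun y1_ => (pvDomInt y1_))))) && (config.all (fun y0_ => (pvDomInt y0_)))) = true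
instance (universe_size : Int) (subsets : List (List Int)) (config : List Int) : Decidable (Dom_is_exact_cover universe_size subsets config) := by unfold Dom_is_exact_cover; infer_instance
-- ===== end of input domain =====

-- B replaces A's incremental membership scan over a growing set (early return on a repeat)
-- by a sort-based check: concatenate the selected subsets, sort, and test length = universe_size
-- with all adjacent pairs strictly increasing; alternative algorithm, no set is built.


-- ===== PORT A =====
-- inner 'for elem in subsets[idx]' loop with the early 'return False' as Option (none = returned False)
def pvA_inner (covered : PySem.Set Int) (elems : List Int) : Option (PySem.Set Int) :=
  match elems with
  | [] => some covered
  | e :: rest => if PySem.Set.contains covered e then none else pvA_inner (PySem.Set.add covered e) rest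

-- outer 'for idx in selected' loop; subsets[idx] is always in range here (idx < len(config) = len(subsets)),
-- so pyGetD with default [] is exact
def pvA_outer (subsets : List (List Int)) (covered : PySem.Set Int) (sel : List Int) : Option (PySem.Set Int) :=
  match sel with
  | [] => some covered
  | idx :: rest =>
      match pvA_inner covered (PySem.List.pyGetD subsets idx []) with
      | none => none
      | some c => pvA_outer subsets c rest

def is_exact_cover (universe_size : Int) (subsets : List (List Int)) (config : List Int) : Bool :=
  if config.length ≠ subsets.length then false
  else
    let q := PySem.Int.floordiv universe_size 3
    let selected := ((PySem.List.enumerate config 0).filter (fun p => p.2 == 1)).map (fun p => p.1)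
    if (selected.length : Int) ≠ q then false
    else
      match pvA_outer subsets PySem.Set.empty selected with
      | none => false
      | some covered => decide (PySem.Set.len covered = universe_size)

-- ===== PORT B =====
def is_exact_cover_alt (universe_size : Int) (subsets : List (List Int)) (config : List Int) : Bool :=
  if config.length ≠ subsets.length then false
  else
    let picked := ((subsets.zip config).filter (fun p => p.2 == 1)).map Prod.fst
    if (picked.length : Int) ≠ PySem.Int.floordiv universe_size 3 then false
    else
      let elems := PySem.List.sorted picked.flatten (fun x => x) false
      if (elems.length : Int) ≠ universe_size then false
      else (elems.zip elems.tail).all (fun p => decide (p.1 < p.2))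

-- ===== PRECONDITION & SPEC =====
def Spec_is_exact_cover (universe_size : Int) (subsets : List (List Int)) (config : List Int) (out : Bool) : Prop := out = is_exact_cover_alt universe_size subsets config
instance (universe_size : Int) (subsets : List (List Int)) (config : List Int) (out : Bool) : Decidable (Spec_is_exact_cover universe_size subsets config out) := by unfold Spec_is_exact_cover; infer_instance

-- ===== CLAIM (what is proved, stated in full; the proofs are below) =====
def Claim_equal_is_exact_cover : Prop := ∀ (universe_size : Int) (subsets : List (List Int)) (config : List Int), Dom_is_exact_cover universe_size subsets config → Spec_is_exact_cover universe_size subsets config (is_exact_cover universe_size subsets config)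

-- ===== LEMMAS AND PROOFS =====

-- A's inner loop succeeds exactly on fresh, duplicate-free elements, appending them to covered
theorem pvA_inner_eq (elems : List Int) (s : PySem.Set Int) :
    pvA_inner s elems =
      if elems.Nodup ∧ ∀ x ∈ elems, x ∉ s then some (s ++ elems) else none := by
  induction elems generalizing s with
  | nil => simp [pvA_inner]
  | cons e rest ih =>
    by_cases he : e ∈ s
    · have hc : PySem.Set.contains s e = true := (PySem.Set.contains_iff s e).mpr he
      simp only [pvA_inner, hc, if_true]
      rw [if_neg]
      rintro ⟨-, h2⟩
      exact h2 e (List.mem_cons_self) he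
    · have hc : PySem.Set.contains s e = false := by
        by_contra h
        exact he ((PySem.Set.contains_iff s e).mp (by simpa using h))
      have hadd : PySem.Set.add s e = s ++ [e] := PySem.Set.add_of_not_mem he
      simp only [pvA_inner, hc, Bool.false_eq_true, if_false, hadd, ih]
      have hiff : (rest.Nodup ∧ ∀ x ∈ rest, x ∉ s ++ [e]) ↔
          ((e :: rest).Nodup ∧ ∀ x ∈ e :: rest, x ∉ s) := by
        simp only [List.nodup_cons, List.mem_append, List.mem_cons, List.not_mem_nil, or_false]
        constructor
        · rintro ⟨h1, h2⟩
          refine ⟨⟨fun hm => (h2 e hm) (Or.inr rfl), h1⟩, ?_⟩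
          rintro x (rfl | hx)
          · exact he
          · exact fun hs => (h2 x hx) (Or.inl hs)
        · rintro ⟨⟨hne, h1⟩, h2⟩
          refine ⟨h1, fun x hx => ?_⟩
          rintro (hs | rfl)
          · exact (h2 x (Or.inr hx)) hs
          · exact hne hx
      rw [if_congr hiff rfl rfl, List.append_assoc]
      rfl

-- A's outer loop over the selected indices, in terms of the flattened selected subsets
theorem pvA_outer_eq (subsets : List (List Int)) (sel : List Int) (s : PySem.Set Int) :
    pvA_outer subsets s sel =
      (let flat := (sel.map (fun i => PySem.List.pyGetD subsets i [])).flatten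
       if flat.Nodup ∧ ∀ x ∈ flat, x ∉ s then some (s ++ flat) else none) := by
  induction sel generalizing s with
  | nil => simp [pvA_outer]
  | cons i rest ih =>
    simp only [pvA_outer, pvA_inner_eq, List.map_cons, List.flatten_cons]
    set g := PySem.List.pyGetD subsets i [] with hg
    set flat' := (rest.map (fun i => PySem.List.pyGetD subsets i [])).flatten with hflat
    by_cases h1 : g.Nodup ∧ ∀ x ∈ g, x ∉ s
    · rw [if_pos h1]
      change pvA_outer subsets (s ++ g) rest = _
      rw [ih (s ++ g)]
      simp only []
      have hiff : (flat'.Nodup ∧ ∀ x ∈ flat', x ∉ s ++ g) ↔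
          ((g ++ flat').Nodup ∧ ∀ x ∈ g ++ flat', x ∉ s) := by
        constructor
        · rintro ⟨hn, h2⟩
          have h2' : ∀ x ∈ flat', x ∉ s ∧ x ∉ g := by
            intro x hx
            have hx2 := h2 x hx
            rw [List.mem_append] at hx2
            exact ⟨fun h => hx2 (Or.inl h), fun h => hx2 (Or.inr h)⟩
          refine ⟨List.Nodup.append h1.1 hn (fun a hag haf => (h2' a haf).2 hag), ?_⟩
          intro x hx
          rcases List.mem_append.mp hx with hxg | hxf
          · exact h1.2 x hxg
          · exact (h2' x hxf).1
        · rintro ⟨hn, h2⟩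
          rcases List.nodup_append.mp hn with ⟨-, hnf, hdisj⟩
          refine ⟨hnf, ?_⟩
          intro x hx
          rw [List.mem_append]
          rintro (hs | hg)
          · exact h2 x (List.mem_append.mpr (Or.inr hx)) hs
          · exact hdisj x hg x hx rfl
      rw [if_congr hiff rfl rfl, List.append_assoc]
    · rw [if_neg h1, if_neg]
      rintro ⟨hn, h2⟩
      apply h1
      rw [List.nodup_append] at hn
      exact ⟨hn.1, fun x hx => h2 x (List.mem_append_left _ hx)⟩

-- the list A flattens equals the list B flattens (same selected subsets)
theorem pv_pick_eq (config : List Int) (subsets pre : List (List Int))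
    (h : config.length = subsets.length) :
    ((PySem.List.enumerate config (pre.length : Int)).filter (fun p => p.2 == 1)).map
        (fun p => PySem.List.pyGetD (pre ++ subsets) p.1 []) =
      ((subsets.zip config).filter (fun p => p.2 == 1)).map Prod.fst := by
  induction config generalizing subsets pre with
  | nil =>
    cases subsets with
    | nil => simp [PySem.List.enumerate]
    | cons s ss => simp at h
  | cons c cs ih =>
    cases subsets with
    | nil => simp at h
    | cons s ss =>
      have hlen : cs.length = ss.length := by simpa using h
      have hstep := ih ss (pre ++ [s]) hlen
      have hget : PySem.List.pyGetD (pre ++ s :: ss) (pre.length : Int) [] = s := by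
        rw [PySem.List.pyGetD_natCast]
        simp [List.getD_eq_getElem?_getD]
      rw [PySem.List.enumerate_cons, List.zip_cons_cons]
      by_cases hc : c = 1
      · subst hc
        simp only [List.filter_cons, beq_self_eq_true, if_true, List.map_cons, hget]
        congr 1
        have : ((pre ++ [s]).length : Int) = (pre.length : Int) + 1 := by
          simp
        rw [← this]
        have happ : (pre ++ [s]) ++ ss = pre ++ s :: ss := by simp
        rw [← happ]
        exact hstep
      · have hbc : (c == 1) = false := by simpa using hc
        simp only [List.filter_cons, hbc, Bool.false_eq_true, if_false]
        have : ((pre ++ [s]).length : Int) = (pre.length : Int) + 1 := by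
          simp
        rw [← this]
        have happ : (pre ++ [s]) ++ ss = pre ++ s :: ss := by simp
        rw [← happ]
        exact hstep

-- zip-with-tail all-< equals Chain' (<)
theorem pv_allAdj_iff (l : List Int) :
    ((l.zip l.tail).all (fun p => decide (p.1 < p.2)) = true) ↔ l.IsChain (· < ·) := by
  induction l with
  | nil => simpa using List.IsChain.nil
  | cons a t ih =>
    cases t with
    | nil => simpa using List.IsChain.singleton a
    | cons b u =>
      simp only [List.tail_cons, List.zip_cons_cons, List.all_cons, Bool.and_eq_true,
        decide_eq_true_eq, List.isChain_cons_cons]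
      rw [← ih]
      simp [List.tail_cons]

-- the sorted flattened list is strictly increasing iff the flattened list has no duplicates
theorem pv_sorted_adj_iff (l : List Int) :
    (PySem.List.sorted l (fun x => x) false).IsChain (· < ·) ↔ l.Nodup := by
  rw [List.isChain_iff_pairwise]
  constructor
  · intro h
    have hnd : (PySem.List.sorted l (fun x => x) false).Nodup := h.imp ne_of_lt
    exact (PySem.List.sorted_perm l (fun x => x) false).nodup_iff.mp hnd
  · intro h
    have hnd : (PySem.List.sorted l (fun x => x) false).Nodup :=
      (PySem.List.sorted_perm l (fun x => x) false).nodup_iff.mpr h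
    have hle : (PySem.List.sorted l (fun x => x) false).Pairwise (fun a b => a ≤ b) :=
      PySem.List.sorted_pairwise l (fun x => x)
    exact (hle.and hnd).imp (fun hx => lt_of_le_of_ne hx.1 hx.2)

-- ===== VERDICT (by name: the statement is the Claim_ definition above) =====
theorem is_exact_cover_spec : Claim_equal_is_exact_cover := by
  intro u subsets config _
  unfold Spec_is_exact_cover is_exact_cover is_exact_cover_alt
  by_cases hlen : config.length ≠ subsets.length
  · rw [if_pos hlen, if_pos hlen]
  · rw [if_neg hlen, if_neg hlen]
    push_neg at hlen
    have hpick := pv_pick_eq config subsets [] hlen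
    simp only [List.length_nil, Nat.cast_zero, List.nil_append] at hpick
    set fl := (PySem.List.enumerate config 0).filter (fun p => p.2 == 1) with hfl
    set pk := ((subsets.zip config).filter (fun p => p.2 == 1)).map Prod.fst with hpk
    have hcount : ((fl.map (fun p => p.1)).length : Int) = (pk.length : Int) := by
      rw [← hpick]; simp
    by_cases hq : ((fl.map (fun p => p.1)).length : Int) ≠ PySem.Int.floordiv u 3
    · rw [if_pos hq, if_pos (by rw [← hcount]; exact hq)]
    · push_neg at hq
      rw [if_neg (by rw [hq]; simp), if_neg (by rw [← hcount, hq]; simp)]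
      rw [pvA_outer_eq]
      simp only [List.map_map]
      have hflA : (fl.map ((fun i => PySem.List.pyGetD subsets i []) ∘ (fun p => p.1))).flatten
          = pk.flatten := by
        exact congrArg List.flatten hpick
      rw [hflA]
      set flat := pk.flatten with hflatdef
      simp only [PySem.Set.empty, List.not_mem_nil, not_false_iff, implies_true, and_true,
        List.nil_append]
      have hslen : ((PySem.List.sorted flat (fun x => x) false).length : Int) = (flat.length : Int) := by
        rw [PySem.List.length_sorted]
      have hadj : ((PySem.List.sorted flat (fun x => x) false).zip
          (PySem.List.sorted flat (fun x => x) false).tail).all (fun p => decide (p.1 < p.2))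
          = decide flat.Nodup := by
        by_cases hnd : flat.Nodup
        · simp only [hnd, decide_true]
          exact (pv_allAdj_iff _).mpr ((pv_sorted_adj_iff flat).mpr hnd)
        · simp only [hnd, decide_false]
          exact Bool.eq_false_iff.mpr
            (fun hcon => hnd ((pv_sorted_adj_iff flat).mp ((pv_allAdj_iff _).mp hcon)))
      by_cases hnd : flat.Nodup
      · rw [if_pos hnd]
        show decide (PySem.Set.len flat = u) = _
        have hl : PySem.Set.len flat = (flat.length : Int) := rfl
        by_cases hu : ((flat.length : Int) = u)
        · rw [if_neg (by rw [hslen, hu]; simp), hadj]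
          rw [hl, hu]
          simp [hnd]
        · rw [if_pos (by rw [hslen]; exact hu)]
          rw [hl]
          simp [hu]
      · rw [if_neg hnd]
        by_cases hu : ((flat.length : Int) = u)
        · rw [if_neg (by rw [hslen, hu]; simp), hadj]
          simp [hnd]
        · rw [if_pos (by rw [hslen]; exact hu)]
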